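-- pv_equiv track=rewrite | github.com/ayushii206/Collective_Robotics | A2/ros_work/build/collective_robotics/build/lib/collective_robotics/task1_copy.py | further_simplify_path
-- ===== SOURCE A (Python) =====
-- def further_simplify_path(path, segment_step=5):
--     """Further simplifies the path by segmenting and selecting every nth point."""
--     if not path or len(path) < 3:
--         return path  # No need to simplify if the path is too short
--
--     final_path = [path[0]]  # Always start with the first point
--     segment = [path[0]]  # Initialize the first segment
--
--     for i in range(1, len(path)):
--         prev = path[i - 1]
--         current = path[i]
--
--         # Check if current point is exactly one step away in either x or y direction
--         if abs(current[0] - prev[0]) <= 1 and abs(current[1] - prev[1]) <= 1: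
--             segment.append(current)
--         else:
--             # If current point is farther away, process the segment
--             if len(segment) > 1:
--                 # Select every nth point from the segment
--                 segment_simplified = [segment[j]
--                                       for j in range(0, len(segment), segment_step)]
--                 if segment[-1] not in segment_simplified:
--                     segment_simplified.append(
--                         segment[-1])  # Ensure the last point is included
--                 final_path.extend(segment_simplified)
--             else:
--                 final_path.extend(segment)
--
--             # Reset the segment with the current point
--             segment = [current]
--
--     # Process the last segment
--     if len(segment) > 1:
--         segment_simplified = [segment[j]
--                               for j in range(0, len(segment), segment_step)]
--         if segment[-1] not in segment_simplified:
--             segment_simplified.append(segment[-1])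
--         final_path.extend(segment_simplified)
--     else:
--         final_path.extend(segment)
--
--     final_path.append(path[-1])  # Always end with the last point
--     return final_path
-- ===== SOURCE B (Python) =====
-- def further_simplify_path(path, segment_step=5):
--     """Index-arithmetic version: pass 1 computes, for every position, the start
--     index of the maximal contiguous run containing it; pass 2 emits each run,
--     at its end position, as a stride-slice of the original path."""
--     if not path or len(path) < 3:
--         return path
--
--     n = len(path)
--     # Pass 1: start[i] = start index of the run containing position i.
--     start = [0]
--     for i in range(1, n):
--         if abs(path[i][0] - path[i - 1][0]) > 1 or abs(path[i][1] - path[i - 1][1]) > 1: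
--             start.append(i)
--         else:
--             start.append(start[-1])
--
--     # Pass 2: at each run end, subsample that run by slicing the path directly.
--     out = [path[0]]
--     for i in range(0, n):
--         if i == n - 1 or start[i + 1] == i + 1:  # position i ends its run
--             s = start[i]
--             run = path[s:i + 1]
--             if len(run) > 1:
--                 picked = run[0:len(run):segment_step]
--                 if run[-1] not in picked:
--                     picked.append(run[-1])
--                 out += picked
--             else:
--                 out += run
--     out.append(path[-1])
--     return out
-- ===== Notes on version B (the rewrite author's own statement) =====
-- stated objective: alternative
-- what changed: A makes one stateful pass accumulating the current segment as a list and flushing it inline with a range-comprehension subsample; B never accumulates segments: pass 1 computes an integer array start[i] = run-start index of each position, pass 2 detects run ends by index arithmetic (start[i+1]==i+1) and emits each run as stride-slices of the original path.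
-- outside the precondition, e.g. on further_simplify_path([(0, 0), (1, 1), (9, 9)], 0): A raises ValueError, B raises ValueError
import Mathlib
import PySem

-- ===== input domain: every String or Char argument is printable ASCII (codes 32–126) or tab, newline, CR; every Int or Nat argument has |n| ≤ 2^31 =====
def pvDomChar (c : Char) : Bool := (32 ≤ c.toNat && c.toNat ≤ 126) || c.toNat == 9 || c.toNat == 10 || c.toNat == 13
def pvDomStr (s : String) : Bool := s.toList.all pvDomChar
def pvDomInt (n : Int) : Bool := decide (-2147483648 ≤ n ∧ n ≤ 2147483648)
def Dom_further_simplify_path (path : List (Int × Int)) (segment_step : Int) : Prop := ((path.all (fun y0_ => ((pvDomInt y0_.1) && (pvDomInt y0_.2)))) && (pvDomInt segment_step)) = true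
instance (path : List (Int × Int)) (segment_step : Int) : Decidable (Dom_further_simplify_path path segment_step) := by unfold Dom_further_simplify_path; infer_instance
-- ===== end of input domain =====

-- B replaces A's running-segment accumulator by index arithmetic: pass 1 builds the
-- run-start index array, pass 2 emits each run, at its end position, as stride-slices
-- of the original path — objective: alternative decomposition, same exact return value.

-- ===== PORT A =====
-- single pass: the loop carries (final_path, segment) and flushes 'segment' inline
def further_simplify_path (path : List (Int × Int)) (segment_step : Int) : List (Int × Int) :=
  if path = [] ∨ path.length < 3 then path
  else
    let p0 := PySem.List.pyGetD path 0 (0, 0)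
    let st := (PySem.List.pyRange 1 path.length 1).foldl
      (fun (st : List (Int × Int) × List (Int × Int)) i =>
        let prev := PySem.List.pyGetD path (i - 1) (0, 0)
        let current := PySem.List.pyGetD path i (0, 0)
        if |current.1 - prev.1| ≤ 1 ∧ |current.2 - prev.2| ≤ 1 then
          (st.1, st.2 ++ [current])
        else
          (st.1 ++
            (if 1 < st.2.length then
              let ss := (PySem.List.pyRange 0 st.2.length segment_step).map
                (fun j => PySem.List.pyGetD st.2 j (0, 0))
              if PySem.List.pyGetD st.2 (-1) (0, 0) ∈ ss then ss
              else ss ++ [PySem.List.pyGetD st.2 (-1) (0, 0)]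
            else st.2), [current]))
      ([p0], [p0])
    let final := st.1 ++
      (if 1 < st.2.length then
        let ss := (PySem.List.pyRange 0 st.2.length segment_step).map
          (fun j => PySem.List.pyGetD st.2 j (0, 0))
        if PySem.List.pyGetD st.2 (-1) (0, 0) ∈ ss then ss
        else ss ++ [PySem.List.pyGetD st.2 (-1) (0, 0)]
      else st.2)
    final ++ [PySem.List.pyGetD path (-1) (0, 0)]

-- ===== PORT B =====
-- pass 1: start[i] = run-start index of position i; pass 2: emit at run ends via slices
def further_simplify_path_alt (path : List (Int × Int)) (segment_step : Int) : List (Int × Int) :=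
  if path = [] ∨ path.length < 3 then path
  else
    let n : Int := path.length
    let start := (PySem.List.pyRange 1 n 1).foldl
      (fun (st : List Int) i =>
        if 1 < |(PySem.List.pyGetD path i (0, 0)).1 - (PySem.List.pyGetD path (i - 1) (0, 0)).1| ∨
           1 < |(PySem.List.pyGetD path i (0, 0)).2 - (PySem.List.pyGetD path (i - 1) (0, 0)).2| then
          st ++ [i]
        else st ++ [PySem.List.pyGetD st (-1) 0]) [0]
    let out := (PySem.List.pyRange 0 n 1).foldl
      (fun (acc : List (Int × Int)) i =>
        if i = n - 1 ∨ PySem.List.pyGetD start (i + 1) 0 = i + 1 then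
          let s := PySem.List.pyGetD start i 0
          let run := PySem.List.slice path (some s) (some (i + 1))
          acc ++
            (if 1 < run.length then
              let picked := (PySem.List.slice? run (some 0) (some (run.length : Int)) segment_step).getD []
              if PySem.List.pyGetD run (-1) (0, 0) ∈ picked then picked
              else picked ++ [PySem.List.pyGetD run (-1) (0, 0)]
            else run)
        else acc) [PySem.List.pyGetD path 0 (0, 0)]
    out ++ [PySem.List.pyGetD path (-1) (0, 0)]

-- ===== PRECONDITION & SPEC =====
-- Pre_ excludes exactly the inputs where Python A raises ValueError (range step 0):
-- segment_step = 0 together with a path of length ≥ 3 containing some adjacent pair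
-- at distance ≤ 1 in both coordinates (so a multi-point segment is subsampled).
def Pre_further_simplify_path (path : List (Int × Int)) (segment_step : Int) : Prop :=
  segment_step ≠ 0 ∨ path.length < 3 ∨
    ∀ pc ∈ path.zip (path.drop 1), ¬(|pc.2.1 - pc.1.1| ≤ 1 ∧ |pc.2.2 - pc.1.2| ≤ 1)
instance (path : List (Int × Int)) (segment_step : Int) : Decidable (Pre_further_simplify_path path segment_step) := by unfold Pre_further_simplify_path; infer_instance

def pvWitness_further_simplify_path : (List (Int × Int)) × Int := ([(0, 0), (1, 1), (2, 2), (9, 9)], 2)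

def Spec_further_simplify_path (path : List (Int × Int)) (segment_step : Int) (out : List (Int × Int)) : Prop := out = further_simplify_path_alt path segment_step
instance (path : List (Int × Int)) (segment_step : Int) (out : List (Int × Int)) : Decidable (Spec_further_simplify_path path segment_step out) := by unfold Spec_further_simplify_path; infer_instance

-- ===== CLAIM (what is proved, stated in full; the proofs are below) =====
def Claim_equal_further_simplify_path : Prop := ∀ (path : List (Int × Int)) (segment_step : Int), Dom_further_simplify_path path segment_step → Pre_further_simplify_path path segment_step → Spec_further_simplify_path path segment_step (further_simplify_path path segment_step)

-- ===== LEMMAS AND PROOFS =====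

-- A's subsampling of one segment (range-comprehension form)
def pvPickA (g : List (Int × Int)) (step : Int) : List (Int × Int) :=
  if 1 < g.length then
    let ss := (PySem.List.pyRange 0 g.length step).map (fun j => PySem.List.pyGetD g j (0, 0))
    if PySem.List.pyGetD g (-1) (0, 0) ∈ ss then ss
    else ss ++ [PySem.List.pyGetD g (-1) (0, 0)]
  else g
def pvPickB (g : List (Int × Int)) (step : Int) : List (Int × Int) :=
  if 1 < g.length then
    let picked := (PySem.List.slice? g (some 0) (some (g.length : Int)) step).getD []
    if PySem.List.pyGetD g (-1) (0, 0) ∈ picked then picked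
    else picked ++ [PySem.List.pyGetD g (-1) (0, 0)]
  else g
def pvS (path : List (Int × Int)) : Nat → Nat
  | 0 => 0
  | m + 1 =>
    if 1 < |(path.getD (m + 1) (0, 0)).1 - (path.getD m (0, 0)).1| ∨
       1 < |(path.getD (m + 1) (0, 0)).2 - (path.getD m (0, 0)).2| then m + 1
    else pvS path m
theorem pvS_le (path : List (Int × Int)) (m : Nat) : pvS path m ≤ m := by
  induction m with
  | zero => simp [pvS]
  | succ m ih => unfold pvS; split <;> omega
def pvStarts (path : List (Int × Int)) (M : Nat) : List Int :=
  (List.range M).map (fun k => ((pvS path k : Nat) : Int))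
def pvBodyA (path : List (Int × Int)) (step : Int)
    (st : List (Int × Int) × List (Int × Int)) (i : Int) :
    List (Int × Int) × List (Int × Int) :=
  let prev := PySem.List.pyGetD path (i - 1) (0, 0)
  let current := PySem.List.pyGetD path i (0, 0)
  if |current.1 - prev.1| ≤ 1 ∧ |current.2 - prev.2| ≤ 1 then
    (st.1, st.2 ++ [current])
  else
    (st.1 ++ pvPickA st.2 step, [current])
def pvBodyB (path : List (Int × Int)) (step : Int) (acc : List (Int × Int)) (i : Int) :
    List (Int × Int) :=
  if i = (path.length : Int) - 1 ∨ PySem.List.pyGetD (pvStarts path path.length) (i + 1) 0 = i + 1 then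
    let s := PySem.List.pyGetD (pvStarts path path.length) i 0
    let run := PySem.List.slice path (some s) (some (i + 1))
    acc ++ pvPickB run step
  else acc

-- the stride-slice g[0:len(g):step] is A's range comprehension, for every step
theorem pvSliceEq (g : List (Int × Int)) (step : Int) :
    (PySem.List.slice? g (some 0) (some (g.length : Int)) step).getD []
      = (PySem.List.pyRange 0 g.length step).map (fun j => PySem.List.pyGetD g j (0, 0)) := by
  by_cases h0 : step = 0
  · simp [PySem.List.slice?, PySem.List.pyRange, h0]
  rcases lt_or_gt_of_ne h0 with hneg | hpos
  · simp only [PySem.List.slice?, PySem.List.sliceIndices, PySem.List.pyRange, if_neg h0]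
    have h1 : ¬ ((0:Int) < step) := by omega
    have h2 : ¬ ((g.length : Int) < 0) := by omega
    simp only [if_neg h1, if_neg h2, if_pos hneg]
    rcases Nat.eq_zero_or_pos g.length with hz | hp
    · simp [hz]
    · have hmin0 : min (0:Int) ((g.length : Int) - 1) = 0 := by omega
      have hminl : min ((g.length : Int)) ((g.length : Int) - 1) = (g.length : Int) - 1 := by omega
      have hne : ¬ ((g.length : Int) - 1 < 0) := by omega
      simp only [hmin0, hminl]
      simp [hne]
  · simp only [PySem.List.slice?, PySem.List.sliceIndices, PySem.List.pyRange, if_neg h0]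
    have h1 : ¬ (step < 0) := by omega
    have h00 : ¬ ((0:Int) < 0) := by omega
    have hL0 : ¬ ((g.length : Int) < 0) := by omega
    have hmin0 : min (0:Int) ((g.length : Int)) = 0 := by omega
    have hminl : min ((g.length : Int)) ((g.length : Int)) = (g.length : Int) := by omega
    simp only [if_neg h1, if_pos hpos, if_neg h00, if_neg hL0, hmin0, hminl]
    rcases Nat.eq_zero_or_pos g.length with hz | hp
    · simp [hz]
    · have hlt : (0:Int) < (g.length : Int) := by exact_mod_cast hp
      simp only [if_pos hlt, Option.getD_some, List.map_map]
      set q := (((g.length : Int) - 0 + step - 1) / step) with hq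
      have hdiv : q * step ≤ (g.length : Int) - 0 + step - 1 := Int.ediv_mul_le _ (by omega)
      have key : ∀ k ∈ List.range q.toNat,
          (fun x : Nat => g[((0:Int) + step * (x : Int)).toNat]?) k
            = ((some ∘ fun k : Nat => PySem.List.pyGetD g (0 + step * (k : Int)) (0, 0)) k) := by
        intro k hk
        simp only [List.mem_range] at hk
        have hkq : (k : Int) ≤ q - 1 := by omega
        have hmul : step * (k : Int) ≤ step * (q - 1) :=
          mul_le_mul_of_nonneg_left hkq (by omega)
        have hring : step * (q - 1) = q * step - step := by ring
        have hnn : (0:Int) ≤ step * (k : Int) := mul_nonneg (by omega) (by omega)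
        have hlt2 : ((0:Int) + step * (k : Int)).toNat < g.length := by omega
        have hInt : ((0:Int) + step * (k : Int)) < ((g.length : Int)) := by omega
        simp only [Function.comp_apply]
        rw [List.getElem?_eq_getElem hlt2,
          PySem.List.pyGetD_eq_getElem g (0, 0) (by omega) hInt]
      rw [List.filterMap_congr key, List.filterMap_eq_map]
      simp [Function.comp]

theorem pvPickEq (g : List (Int × Int)) (step : Int) : pvPickB g step = pvPickA g step := by
  unfold pvPickA pvPickB
  rw [pvSliceEq]

theorem pvCouple (path : List (Int × Int)) (step : Int) (M : Nat)
    (hM : 1 ≤ M) :  ∀ (hMn : M ≤ path.length),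
    (PySem.List.pyRange 1 (M : Int) 1).foldl (pvBodyA path step)
        ([PySem.List.pyGetD path 0 (0, 0)], [PySem.List.pyGetD path 0 (0, 0)])
      = ((PySem.List.pyRange 0 ((M - 1 : Nat) : Int) 1).foldl (pvBodyB path step)
           [PySem.List.pyGetD path 0 (0, 0)],
         PySem.List.slice path (some ((pvS path (M - 1) : Nat) : Int)) (some (M : Int))) := by
  induction M, hM using Nat.le_induction with
  | base =>
    intro hMn
    have h0 : path ≠ [] := by intro h; simp [h] at hMn
    show List.foldl _ _ (PySem.List.pyRange 1 ((1:Nat):Int) 1) = _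
    norm_num [PySem.List.pyRange, pvS, PySem.List.slice_natCast]
    cases path with
    | nil => simp at hMn
    | cons a t =>
      simp [PySem.List.slice, PySem.List.pyGetD_zero_cons, PySem.List.clampIdx]
  | succ m hm ih =>
    intro hMn
    obtain ⟨k, rfl⟩ : ∃ k, m = k + 1 := ⟨m - 1, by omega⟩
    have hk2 : k + 2 ≤ path.length := by omega
    have hk1 : k + 1 < path.length := by omega
    have hklen : k < path.length := by omega
    -- split off the new index on both folds
    have hA : ((k + 1 + 1 : Nat) : Int) = ((k + 1 : Nat) : Int) + 1 := by push_cast; ring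
    rw [hA, PySem.List.pyRange_one_succ_right (by exact_mod_cast by omega : (1:Int) ≤ ((k+1:Nat):Int)),
      List.foldl_append, List.foldl_cons, List.foldl_nil, ih (by omega)]
    simp only [Nat.add_sub_cancel]
    -- shared facts
    have hgd : path.getD (k + 1) (0, 0) = path[k + 1] := List.getD_eq_getElem _ _ hk1
    have hstart : ∀ j : Nat, j < path.length →
        PySem.List.pyGetD (pvStarts path path.length) ((j : Nat) : Int) 0 = ((pvS path j : Nat) : Int) := by
      intro j hj
      rw [PySem.List.pyGetD_natCast]
      exact PySem.List.getD_map_range _ _ _ _ hj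
    have hdef : pvS path (k + 1) = if 1 < |(path.getD (k + 1) (0, 0)).1 - (path.getD k (0, 0)).1| ∨
        1 < |(path.getD (k + 1) (0, 0)).2 - (path.getD k (0, 0)).2| then k + 1 else pvS path k := rfl
    have eB : ((k + 1 : Nat) : Int) = ((k : Nat) : Int) + 1 := by push_cast; ring
    have e1 : ((k + 1 : Nat) : Int) - 1 = ((k : Nat) : Int) := by push_cast; ring
    conv_rhs => rw [eB, PySem.List.pyRange_one_succ_right (by positivity), List.foldl_append,
      List.foldl_cons, List.foldl_nil]
    unfold pvBodyA pvBodyB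
    simp only [e1, PySem.List.pyGetD_natCast]
    have hnotend : ¬ ((k : Nat) : Int) = (path.length : Int) - 1 := by
      intro h; omega
    by_cases hadj : |(path.getD (k + 1) (0, 0)).1 - (path.getD k (0, 0)).1| ≤ 1 ∧
        |(path.getD (k + 1) (0, 0)).2 - (path.getD k (0, 0)).2| ≤ 1
    · -- contiguous: segment grows, B emits nothing
      have hbrk : ¬ (1 < |(path.getD (k + 1) (0, 0)).1 - (path.getD k (0, 0)).1| ∨
          1 < |(path.getD (k + 1) (0, 0)).2 - (path.getD k (0, 0)).2|) := by
        push_neg; exact hadj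
      have hS : pvS path (k + 1) = pvS path k := by rw [hdef, if_neg hbrk]
      have hcond : ¬ (((k : Nat) : Int) = (path.length : Int) - 1 ∨
          PySem.List.pyGetD (pvStarts path path.length) (((k : Nat) : Int) + 1) 0 = ((k : Nat) : Int) + 1) := by
        push_neg
        refine ⟨hnotend, ?_⟩
        rw [← eB, hstart (k + 1) hk1, hS]
        have h1 := pvS_le path k
        intro h
        omega
      rw [if_pos hadj, if_neg hcond]
      refine Prod.ext rfl ?_
      dsimp only
      rw [hS]
      have e2 : ((k : Nat) : Int) + 1 + 1 = ((k + 2 : Nat) : Int) := by push_cast; ring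
      rw [e2, PySem.List.slice_natCast, PySem.List.slice_natCast, hgd]
      have hs := pvS_le path k
      have e3 : k + 2 - pvS path k = (k + 1 - pvS path k) + 1 := by omega
      rw [e3, List.take_add_one]
      have e4 : (path.drop (pvS path k))[k + 1 - pvS path k]? = some path[k + 1] := by
        rw [List.getElem?_drop]
        have e5 : pvS path k + (k + 1 - pvS path k) = k + 1 := by omega
        rw [e5, List.getElem?_eq_getElem hk1]
      rw [e4]
      rfl
    · -- break: A flushes the segment, B emits the run ending at k
      have hbrk : 1 < |(path.getD (k + 1) (0, 0)).1 - (path.getD k (0, 0)).1| ∨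
          1 < |(path.getD (k + 1) (0, 0)).2 - (path.getD k (0, 0)).2| := by
        by_contra h
        push_neg at h
        exact hadj h
      have hS : pvS path (k + 1) = k + 1 := by rw [hdef, if_pos hbrk]
      have hcond : (((k : Nat) : Int) = (path.length : Int) - 1 ∨
          PySem.List.pyGetD (pvStarts path path.length) (((k : Nat) : Int) + 1) 0 = ((k : Nat) : Int) + 1) := by
        right
        rw [← eB, hstart (k + 1) hk1, hS]
      rw [if_neg hadj, if_pos hcond]
      have hstartk : (pvStarts path path.length).getD k 0 = ((pvS path k : Nat) : Int) :=
        PySem.List.getD_map_range _ _ _ _ hklen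
      refine Prod.ext ?_ ?_ <;> dsimp only
      · rw [hstartk, pvPickEq, ← eB]
      · rw [hS]
        have e2 : ((k : Nat) : Int) + 1 + 1 = ((k + 2 : Nat) : Int) := by push_cast; ring
        rw [e2, PySem.List.slice_natCast, List.drop_eq_getElem_cons hk1, hgd]
        have e3 : k + 2 - (k + 1) = 1 := by omega
        rw [e3]
        rfl

theorem pvStartsEq (path : List (Int × Int)) (M : Nat) (hM : 1 ≤ M) :
    (PySem.List.pyRange 1 (M : Int) 1).foldl
      (fun (st : List Int) i =>
        if 1 < |(PySem.List.pyGetD path i (0, 0)).1 - (PySem.List.pyGetD path (i - 1) (0, 0)).1| ∨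
           1 < |(PySem.List.pyGetD path i (0, 0)).2 - (PySem.List.pyGetD path (i - 1) (0, 0)).2| then
          st ++ [i]
        else st ++ [PySem.List.pyGetD st (-1) 0]) [0]
      = pvStarts path M := by
  induction M, hM using Nat.le_induction with
  | base =>
    show List.foldl _ [0] (PySem.List.pyRange 1 ((1:Nat):Int) 1) = _
    norm_num [PySem.List.pyRange, pvStarts, pvS]
  | succ n hn ih =>
    obtain ⟨m, rfl⟩ : ∃ m, n = m + 1 := ⟨n - 1, by omega⟩
    have hcast : (((m + 1 + 1 : Nat)) : Int) = ((m + 1 : Nat) : Int) + 1 := by push_cast; ring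
    rw [hcast, PySem.List.pyRange_one_succ_right (by exact_mod_cast Nat.one_le_iff_ne_zero.mpr (by omega)),
      List.foldl_append, List.foldl_cons, List.foldl_nil, ih]
    have hsub : ((m + 1 : Nat) : Int) - 1 = ((m : Nat) : Int) := by push_cast; ring
    rw [hsub, PySem.List.pyGetD_natCast, PySem.List.pyGetD_natCast]
    have hsplit : pvStarts path (m + 1) = pvStarts path m ++ [((pvS path m : Nat) : Int)] := by
      simp [pvStarts, List.range_succ]
    have hsplit2 : pvStarts path (m + 1 + 1) = pvStarts path (m + 1) ++ [((pvS path (m + 1) : Nat) : Int)] := by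
      simp [pvStarts, List.range_succ]
    rw [hsplit2]
    by_cases hbrk : 1 < |(path.getD (m + 1) (0, 0)).1 - (path.getD m (0, 0)).1| ∨
       1 < |(path.getD (m + 1) (0, 0)).2 - (path.getD m (0, 0)).2|
    all_goals
      have hdef : pvS path (m + 1) = if 1 < |(path.getD (m + 1) (0, 0)).1 - (path.getD m (0, 0)).1| ∨
          1 < |(path.getD (m + 1) (0, 0)).2 - (path.getD m (0, 0)).2| then m + 1 else pvS path m := rfl
    · rw [if_pos hbrk, hdef, if_pos hbrk]
    · rw [if_neg hbrk, hdef, if_neg hbrk, hsplit, PySem.List.pyGetD_neg_one_append_singleton]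

-- assembling the two passes: A's flush-at-break fold equals B's emit-at-run-end fold
theorem pvFinal (path : List (Int × Int)) (step : Int) (h3 : 3 ≤ path.length) :
    ((PySem.List.pyRange 1 (path.length : Int) 1).foldl (pvBodyA path step)
        ([PySem.List.pyGetD path 0 (0, 0)], [PySem.List.pyGetD path 0 (0, 0)])).1
      ++ pvPickA ((PySem.List.pyRange 1 (path.length : Int) 1).foldl (pvBodyA path step)
        ([PySem.List.pyGetD path 0 (0, 0)], [PySem.List.pyGetD path 0 (0, 0)])).2 step
    = (PySem.List.pyRange 0 (path.length : Int) 1).foldl (pvBodyB path step)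
        [PySem.List.pyGetD path 0 (0, 0)] := by
  have hcast : ((path.length : Nat) : Int) = ((path.length - 1 : Nat) : Int) + 1 := by
    push_cast [Nat.cast_sub (by omega : 1 ≤ path.length)]; ring
  rw [pvCouple path step path.length (by omega) le_rfl]
  conv_rhs => rw [hcast, PySem.List.pyRange_one_succ_right (by positivity),
    List.foldl_append, List.foldl_cons, List.foldl_nil]
  unfold pvBodyB
  have hend : ((path.length - 1 : Nat) : Int) = (path.length : Int) - 1 := by
    push_cast [Nat.cast_sub (by omega : 1 ≤ path.length)]; ring
  rw [if_pos (Or.inl hend)]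
  dsimp only
  have hlt : path.length - 1 < path.length := by omega
  have hstart : PySem.List.pyGetD (pvStarts path path.length) ((path.length - 1 : Nat) : Int) 0
      = ((pvS path (path.length - 1) : Nat) : Int) := by
    rw [PySem.List.pyGetD_natCast]
    exact PySem.List.getD_map_range _ _ _ _ hlt
  rw [hstart, ← hcast, pvPickEq]

-- ===== VERDICT (by name: the statement is the Claim_ definition above) =====
theorem further_simplify_path_spec : Claim_equal_further_simplify_path := by
  intro path step _ _
  unfold Spec_further_simplify_path further_simplify_path further_simplify_path_alt
  by_cases hshort : path = [] ∨ path.length < 3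
  · simp [hshort]
  · simp only [if_neg hshort]
    have h3 : 3 ≤ path.length := by
      rcases Nat.lt_or_ge path.length 3 with h | h
      · exact absurd (Or.inr h) hshort
      · exact h
    change
      ((PySem.List.pyRange 1 (path.length : Int) 1).foldl (pvBodyA path step)
          ([PySem.List.pyGetD path 0 (0, 0)], [PySem.List.pyGetD path 0 (0, 0)])).1
        ++ pvPickA ((PySem.List.pyRange 1 (path.length : Int) 1).foldl (pvBodyA path step)
          ([PySem.List.pyGetD path 0 (0, 0)], [PySem.List.pyGetD path 0 (0, 0)])).2 step
        ++ [PySem.List.pyGetD path (-1) (0, 0)]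
      = (PySem.List.pyRange 0 (path.length : Int) 1).foldl
          (fun (acc : List (Int × Int)) i =>
            if i = (path.length : Int) - 1 ∨
                PySem.List.pyGetD
                  ((PySem.List.pyRange 1 (path.length : Int) 1).foldl
                    (fun (st : List Int) i =>
                      if 1 < |(PySem.List.pyGetD path i (0, 0)).1 - (PySem.List.pyGetD path (i - 1) (0, 0)).1| ∨
                         1 < |(PySem.List.pyGetD path i (0, 0)).2 - (PySem.List.pyGetD path (i - 1) (0, 0)).2| then
                        st ++ [i]
                      else st ++ [PySem.List.pyGetD st (-1) 0]) [0]) (i + 1) 0 = i + 1 then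
              acc ++ pvPickB (PySem.List.slice path
                (some (PySem.List.pyGetD
                  ((PySem.List.pyRange 1 (path.length : Int) 1).foldl
                    (fun (st : List Int) i =>
                      if 1 < |(PySem.List.pyGetD path i (0, 0)).1 - (PySem.List.pyGetD path (i - 1) (0, 0)).1| ∨
                         1 < |(PySem.List.pyGetD path i (0, 0)).2 - (PySem.List.pyGetD path (i - 1) (0, 0)).2| then
                        st ++ [i]
                      else st ++ [PySem.List.pyGetD st (-1) 0]) [0]) i 0))
                (some (i + 1))) step
            else acc) [PySem.List.pyGetD path 0 (0, 0)]
          ++ [PySem.List.pyGetD path (-1) (0, 0)]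
    rw [pvStartsEq path path.length (by omega)]
    rw [pvFinal path step h3]
    rfl
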